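-- pv_equiv track=rewrite | github.com/tokenika/eosfactory | amaxfactory/beans/base/eosio.name.from.string.py | string_to_uint64_t
-- ===== SOURCE A (Python) =====
-- def char_to_symbol( char ):
--   c = ord(char)
--   if( c >= ord('a') and c <= ord('z') ):
--      return ( c - ord('a') ) + 6;
--   if( c >= ord('1') and c <= ord('5') ):
--      return (c - ord('1')) + 1;
--   return 0;
--
-- def string_to_uint64_t( s ):
--   n = 0;
--   l = min(12, len(s))
--   for i in range( 0, min(12, len(s)) ):
--      # NOTE: char_to_symbol() returns char type, and without this explicit
--      # expansion to uint64 type, the compilation fails at the point of usage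
--      # of string_to_name(), where the usage requires constant (compile time) expression.
--      n |= (char_to_symbol(s[i]) & 0x1f) << (64 - 5 * (i + 1));
--   # The for-loop encoded up to 60 high bits into uint64 'name' variable,
--   # if (strlen(str) > 12) then encode str[12] into the low (remaining)
--   # 4 bits of 'name'
--   if (len(s) > 12):
--      n |= char_to_symbol(s[12]) & 0x0F;
--   return n;
-- ===== SOURCE B (Python) =====
-- def char_to_symbol( char ):
--   c = ord(char)
--   if( c >= ord('a') and c <= ord('z') ):
--      return ( c - ord('a') ) + 6;
--   if( c >= ord('1') and c <= ord('5') ):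
--      return (c - ord('1')) + 1;
--   return 0;
--
-- _DIGITS = "0123456789abcdefghijklmnopqrstuv"
--
-- def string_to_uint64_t( s ):
--   # staged pipeline: translate the first 12 chars to a base-32 NUMERAL STRING,
--   # right-pad it to fixed width 12, parse it with int(.,32), scale, add the tail
--   digits = ''.join(_DIGITS[char_to_symbol(c) & 0x1f] for c in s[:12])
--   digits = digits + '0' * (12 - len(digits))
--   n = int(digits, 32) * 16
--   if len(s) > 12:
--     n += char_to_symbol(s[12]) & 0x0F
--   return n
-- ===== Notes on version B (the rewrite author's own statement) =====
-- stated objective: alternative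
-- what changed: A packs 5-bit symbols into fixed bit positions of an accumulator with per-index shifts and ORs; B instead builds an intermediate base-32 numeral string (translate each of the first 12 chars to a digit character, right-pad to width 12), parses it with int(digits, 32), scales by 16 and adds the 4-bit 13th symbol.
import Mathlib
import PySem

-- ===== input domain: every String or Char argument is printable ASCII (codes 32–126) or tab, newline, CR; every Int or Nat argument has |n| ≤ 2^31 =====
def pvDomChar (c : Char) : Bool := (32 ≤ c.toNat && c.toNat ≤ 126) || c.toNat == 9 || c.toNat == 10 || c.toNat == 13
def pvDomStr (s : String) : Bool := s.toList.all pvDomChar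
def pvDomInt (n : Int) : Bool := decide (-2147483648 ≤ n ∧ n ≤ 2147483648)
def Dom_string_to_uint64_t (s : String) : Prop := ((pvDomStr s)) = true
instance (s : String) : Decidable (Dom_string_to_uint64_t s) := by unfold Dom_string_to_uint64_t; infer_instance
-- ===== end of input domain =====

-- B replaces A's positional shift-and-OR packing by a staged pipeline: translate the
-- first 12 chars to a base-32 numeral string, pad to width 12, parse it, scale, add tail.

-- ===== PORT A =====
-- helper shared verbatim by Source A and Source B
def char_to_symbol (char : Char) : Int :=
  let c : Int := (char.toNat : Int)
  if 97 ≤ c ∧ c ≤ 122 then (c - 97) + 6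
  else if 49 ≤ c ∧ c ≤ 53 then (c - 49) + 1
  else 0

-- s[i] in the loop is always in range, so the total pyGetD form is exact;
-- the shift exponent 64 - 5*(i+1) is ≥ 4 for i < 12, so .toNat is exact.
def string_to_uint64_t (s : String) : Int :=
  let n : Int := 0
  let _l : Int := min 12 (PySem.Str.len s)
  let n := (PySem.List.pyRange 0 (min 12 (PySem.Str.len s)) 1).foldl
    (fun n i =>
      PySem.Int.bor n
        ((PySem.Int.band (char_to_symbol (PySem.List.pyGetD s.toList i ' ')) 0x1f)
          <<< (64 - 5 * (i + 1)).toNat)) n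
  if PySem.Str.len s > 12 then
    PySem.Int.bor n (PySem.Int.band (char_to_symbol (PySem.List.pyGetD s.toList 12 ' ')) 0x0F)
  else n

-- ===== PORT B =====
-- the module constant _DIGITS
def pvB_DIGITS : List Char := "0123456789abcdefghijklmnopqrstuv".toList

-- hand port of one digit of int(.,32): exact on the lowercase base-32 digit
-- characters that Source B constructs (members of _DIGITS)
def pvB_digitVal (c : Char) : Int :=
  if 48 ≤ c.toNat ∧ c.toNat ≤ 57 then (c.toNat : Int) - 48
  else (c.toNat : Int) - 87

-- _DIGITS[k] has k = sym & 0x1f ∈ [0,32), always in range, so getD is exact;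
-- int(digits, 32) is ported by hand as the left-to-right base-32 Horner fold
-- (exact: every digit Source B produces is a valid lowercase base-32 digit);
-- '0' * (12 - len) matches List.replicate since len ≤ 12.
def string_to_uint64_t_alt (s : String) : Int :=
  let digits : List Char := (PySem.List.slice s.toList none (some 12)).map
    (fun c => pvB_DIGITS.getD (PySem.Int.band (char_to_symbol c) 0x1f).toNat '0')
  let digits := digits ++ List.replicate (12 - digits.length) '0'
  let n : Int := digits.foldl (fun a c => 32 * a + pvB_digitVal c) 0 * 16
  if PySem.Str.len s > 12 then
    n + PySem.Int.band (char_to_symbol (PySem.List.pyGetD s.toList 12 ' ')) 0x0F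
  else n

-- ===== PRECONDITION & SPEC =====
def Spec_string_to_uint64_t (s : String) (out : Int) : Prop := out = string_to_uint64_t_alt s
instance (s : String) (out : Int) : Decidable (Spec_string_to_uint64_t s out) := by unfold Spec_string_to_uint64_t; infer_instance

-- ===== CLAIM (what is proved, stated in full; the proofs are below) =====
def Claim_equal_string_to_uint64_t : Prop := ∀ (s : String), Dom_string_to_uint64_t s → Spec_string_to_uint64_t s (string_to_uint64_t s)

-- ===== LEMMAS AND PROOFS =====

-- the masked 5-bit symbol of one char / at index k
def pvSymC (c : Char) : Int := PySem.Int.band (char_to_symbol c) 31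
def pvSym (L : List Char) (k : Nat) : Int := pvSymC (L.getD k ' ')

-- value of A's loop after k iterations
def pvAccA (L : List Char) : Nat → Int
  | 0 => 0
  | k + 1 => pvAccA L k + pvSym L k * 2 ^ (59 - 5 * k)

-- Horner value of B's digit translation of the first k chars
def pvAccB (L : List Char) : Nat → Int
  | 0 => 0
  | k + 1 => 32 * pvAccB L k + (if k < L.length then pvSym L k else 0)

theorem pvCts_bounds (c : Char) : 0 ≤ char_to_symbol c ∧ char_to_symbol c ≤ 31 := by
  have h : (0:Int) ≤ (c.toNat : Int) := by positivity
  simp only [char_to_symbol]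
  split_ifs <;> omega

theorem pvSymC_nonneg (c : Char) : 0 ≤ pvSymC c :=
  PySem.Int.band_nonneg_of_nonneg_left _ (pvCts_bounds _).1

theorem pvSymC_lt (c : Char) : pvSymC c < 32 := by
  unfold pvSymC
  rw [PySem.Int.band_of_nonneg (pvCts_bounds _).1 (by norm_num)]
  have := Nat.and_le_right (n := (char_to_symbol c).toNat) (m := (31:Int).toNat)
  omega

-- OR of a multiple of 2^k with a remainder below 2^k is addition (Nat form)
theorem pvNatDisj (k x y : Nat) (h : y < 2 ^ k) : (x * 2 ^ k) ||| y = x * 2 ^ k + y := by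
  induction k generalizing x y with
  | zero => interval_cases y <;> simp
  | succ k ih =>
    have h1 : x * 2 ^ (k+1) = Nat.bit false (x * 2 ^ k) := by
      simp [Nat.bit_val]; ring
    have h2 : y = Nat.bit (decide (y % 2 = 1)) (y >>> 1) :=
      (Nat.bit_decide_mod_two_eq_one_shiftRight_one y).symm
    rw [h1]
    conv_lhs => rw [h2]
    rw [Nat.lor_bit, ih x _ (by rw [Nat.shiftRight_one]; omega)]
    rw [Nat.bit_val, Nat.bit_val, Nat.shiftRight_one]
    rcases Nat.mod_two_eq_zero_or_one y with hy | hy <;> simp [hy] <;> omega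

-- the same, for Python's | on nonnegative ints
theorem pvIntDisj (a b : Int) (m : Nat) (ha : 0 ≤ a) (hb : 0 ≤ b)
    (hdvd : (2 ^ m : Int) ∣ a) (hlt : b < 2 ^ m) : PySem.Int.bor a b = a + b := by
  rw [PySem.Int.bor_of_nonneg ha hb]
  obtain ⟨c, hc⟩ := hdvd
  have hc0 : 0 ≤ c := by nlinarith [pow_pos (show (0:Int) < 2 by norm_num) m]
  have hca : (c.toNat : Int) = c := Int.toNat_of_nonneg hc0
  have hd : a = ((c.toNat * 2 ^ m : Nat) : Int) := by push_cast [hca]; linarith [hc]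
  have hd' : a.toNat = c.toNat * 2 ^ m := by rw [hd]; exact Int.toNat_natCast _
  have hblt : b.toNat < 2 ^ m := by
    have : (b.toNat : Int) < ((2 ^ m : Nat) : Int) := by
      rw [Int.toNat_of_nonneg hb]; push_cast; exact hlt
    exact_mod_cast this
  rw [hd', pvNatDisj m c.toNat b.toNat hblt]
  push_cast [hca, Int.toNat_of_nonneg hb]
  rw [hc]; ring

theorem pvAccA_nonneg (L : List Char) (k : Nat) : 0 ≤ pvAccA L k := by
  induction k with
  | zero => simp [pvAccA]
  | succ k ih =>
    have h1 := pvSymC_nonneg (L.getD k ' ')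
    have h2 : (0:Int) ≤ 2 ^ (59 - 5 * k) := by positivity
    have := mul_nonneg h1 h2
    simp only [pvAccA, pvSym]; linarith

-- A's partial OR only occupies bits ≥ 64 - 5k, …
theorem pvAccA_dvd (L : List Char) (k : Nat) (hk : k ≤ 12) :
    (2 ^ (64 - 5 * k) : Int) ∣ pvAccA L k := by
  induction k with
  | zero => simp [pvAccA]
  | succ k ih =>
    have e : 64 - 5 * (k + 1) = 59 - 5 * k := by omega
    rw [e]
    simp only [pvAccA]
    exact dvd_add
      (dvd_trans (pow_dvd_pow 2 (by omega : 59 - 5 * k ≤ 64 - 5 * k)) (ih (by omega)))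
      (dvd_mul_left _ _)

-- … while the next OR'ed term lies strictly below them
theorem pvSymPow_lt (L : List Char) (k : Nat) (hk : k ≤ 11) :
    pvSym L k * 2 ^ (59 - 5 * k) < 2 ^ (64 - 5 * k) := by
  have h1 : (2:Int) ^ (64 - 5 * k) = 32 * 2 ^ (59 - 5 * k) := by
    rw [show 64 - 5 * k = 5 + (59 - 5 * k) from by omega, pow_add]; norm_num
  rw [h1]
  exact mul_lt_mul_of_pos_right (pvSymC_lt _) (by positivity)

-- A's loop computes pvAccA
theorem pvFoldA (s : String) (k : Nat) (hk : k ≤ 12) :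
    (PySem.List.pyRange 0 (k : Int) 1).foldl
      (fun n i =>
        PySem.Int.bor n
          ((PySem.Int.band (char_to_symbol (PySem.List.pyGetD s.toList i ' ')) 0x1f)
            <<< (64 - 5 * (i + 1)).toNat)) 0 = pvAccA s.toList k := by
  induction k with
  | zero => simp [PySem.List.pyRange_one_eq_nil, pvAccA]
  | succ k ih =>
    have hcast : ((k + 1 : Nat) : Int) = (k : Int) + 1 := by push_cast; ring
    rw [hcast, PySem.List.pyRange_one_succ_right (by positivity), List.foldl_append,
        ih (by omega)]
    simp only [List.foldl_cons, List.foldl_nil, PySem.List.pyGetD_natCast]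
    have e : (64 - 5 * ((k : Int) + 1)).toNat = 59 - 5 * k := by omega
    rw [e, Int.shiftLeft_eq]
    rw [show PySem.Int.band (char_to_symbol (s.toList.getD k ' ')) 0x1f = pvSym s.toList k
      from rfl]
    rw [pvIntDisj (pvAccA s.toList k) (pvSym s.toList k * 2 ^ (59 - 5 * k)) (64 - 5 * k)
      (pvAccA_nonneg _ _) (mul_nonneg (pvSymC_nonneg _) (by positivity))
      (pvAccA_dvd _ _ (by omega)) (pvSymPow_lt _ _ (by omega))]
    rfl

-- digit round-trip: reading back the digit char of a 5-bit symbol gives the symbol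
theorem pvDigit_roundtrip_fin :
    ∀ k : Fin 32, pvB_digitVal (pvB_DIGITS.getD (k : Nat) '0') = ((k : Nat) : Int) := by decide

theorem pvDigit_roundtrip (c : Char) :
    pvB_digitVal (pvB_DIGITS.getD (pvSymC c).toNat '0') = pvSymC c := by
  have h0 := pvSymC_nonneg c
  have h1 := pvSymC_lt c
  have hk : (pvSymC c).toNat < 32 := by omega
  have := pvDigit_roundtrip_fin ⟨(pvSymC c).toNat, hk⟩
  simpa [Int.toNat_of_nonneg h0] using this

-- the padding digits contribute pure scaling
theorem pvFoldPad (p : Nat) (a : Int) :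
    (List.replicate p '0').foldl (fun a c => 32 * a + pvB_digitVal c) a = a * 32 ^ p := by
  induction p generalizing a with
  | zero => simp
  | succ p ih =>
    rw [List.replicate_succ, List.foldl_cons, ih]
    have : pvB_digitVal '0' = 0 := by decide
    rw [this]; ring

-- the Horner fold over the translated prefix computes pvAccB
theorem pvFoldTake (L : List Char) (k : Nat) :
    (L.take k).foldl (fun a c => 32 * a + pvSymC c) 0 = pvAccB L (min k L.length) := by
  induction k with
  | zero => simp [pvAccB]
  | succ k ih =>
    rw [List.take_add_one, List.foldl_append, ih]
    by_cases h : k < L.length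
    · have hg : L[k]? = some L[k] := List.getElem?_eq_getElem h
      have h1 : min (k + 1) L.length = min k L.length + 1 := by omega
      have h2 : min k L.length = k := by omega
      rw [hg, h1]
      simp only [Option.toList_some, List.foldl_cons, List.foldl_nil, pvAccB]
      rw [h2, if_pos h, pvSym, List.getD_eq_getElem?_getD, hg]
      rfl
    · have hg : L[k]? = none := List.getElem?_eq_none (by omega)
      have h1 : min (k + 1) L.length = min k L.length := by omega
      rw [hg, h1]
      simp

-- B's shifted Horner accumulator is A's positional OR
theorem pvBridge (L : List Char) (k : Nat) (hk : k ≤ 12) :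
    2 ^ (4 + 5 * (12 - k)) * pvAccB L k = pvAccA L (min k L.length) := by
  induction k with
  | zero => simp [pvAccB, pvAccA]
  | succ k ih =>
    have ih := ih (by omega)
    have epow : (2:Int) ^ (4 + 5 * (12 - k)) = 2 ^ (4 + 5 * (12 - (k + 1))) * 32 := by
      rw [show 4 + 5 * (12 - k) = (4 + 5 * (12 - (k + 1))) + 5 from by omega, pow_add]
      norm_num
    simp only [pvAccB]
    by_cases hlen : k < L.length
    · rw [if_pos hlen]
      have h1 : min (k + 1) L.length = min k L.length + 1 := by omega
      have h2 : min k L.length = k := by omega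
      rw [h1]
      simp only [pvAccA]
      rw [← ih, epow, h2]
      rw [show 59 - 5 * k = 4 + 5 * (12 - (k + 1)) from by omega]
      ring
    · rw [if_neg hlen]
      have h1 : min (k + 1) L.length = min k L.length := by omega
      rw [h1, ← ih, epow]
      ring

-- the 4-bit tail lies in [0, 16)
theorem pvTail_bounds (c : Char) :
    0 ≤ PySem.Int.band (char_to_symbol c) 0x0F ∧ PySem.Int.band (char_to_symbol c) 0x0F < 16 := by
  constructor
  · exact PySem.Int.band_nonneg_of_nonneg_left _ (pvCts_bounds _).1
  · rw [PySem.Int.band_of_nonneg (pvCts_bounds _).1 (by norm_num)]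
    have := Nat.and_le_right (n := (char_to_symbol c).toNat) (m := (15:Int).toNat)
    omega

-- B's whole digit pipeline, scaled by 16, equals A's loop value
theorem pvBval (s : String) :
    (List.foldl (fun a c => 32 * a + pvB_digitVal c) 0
      ((PySem.List.slice s.toList none (some 12)).map
        (fun c => pvB_DIGITS.getD (PySem.Int.band (char_to_symbol c) 0x1f).toNat '0')
      ++ List.replicate (12 - ((PySem.List.slice s.toList none (some 12)).map
        (fun c => pvB_DIGITS.getD (PySem.Int.band (char_to_symbol c) 0x1f).toNat '0')).length) '0')) * 16
    = pvAccA s.toList (min 12 s.toList.length) := by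
  set L := s.toList with hL
  have hslice : PySem.List.slice L none (some ((12:Nat):Int)) = L.take 12 :=
    PySem.List.slice_to_natCast L 12
  rw [show ((12:Int)) = ((12:Nat):Int) from by norm_num, hslice]
  rw [List.foldl_append, List.foldl_map]
  have hfun : (fun (a : Int) c =>
      32 * a + pvB_digitVal (pvB_DIGITS.getD (PySem.Int.band (char_to_symbol c) 0x1f).toNat '0'))
      = (fun a c => 32 * a + pvSymC c) := by
    funext a c
    rw [show PySem.Int.band (char_to_symbol c) 0x1f = pvSymC c from rfl, pvDigit_roundtrip]
  rw [hfun, pvFoldTake, pvFoldPad]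
  have hlen : (List.take 12 L).length = min 12 L.length := by simp [List.length_take]
  rw [List.length_map, hlen]
  set m := min 12 L.length with hm
  have hm12 : m ≤ 12 := by omega
  have h32 : (32:Int) ^ (12 - m) * 16 = 2 ^ (4 + 5 * (12 - m)) := by
    rw [show (32:Int) = 2 ^ 5 from by norm_num, ← pow_mul, pow_add]
    ring
  rw [mul_assoc, h32, mul_comm, pvBridge L m hm12]
  congr 1
  omega

-- ===== VERDICT (by name: the statement is the Claim_ definition above) =====
theorem string_to_uint64_t_spec : Claim_equal_string_to_uint64_t := by
  intro s _
  unfold Spec_string_to_uint64_t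
  simp only [string_to_uint64_t, string_to_uint64_t_alt]
  have hm : min (12:Int) (PySem.Str.len s) = ((min 12 s.toList.length : Nat) : Int) := by
    rw [PySem.Str.len_eq]; push_cast; omega
  rw [hm, pvFoldA s _ (min_le_left _ _), pvBval s]
  by_cases hlen : PySem.Str.len s > 12
  · rw [if_pos hlen, if_pos hlen]
    have hm' : min 12 s.toList.length = 12 := by
      rw [PySem.Str.len_eq] at hlen; omega
    rw [hm']
    exact pvIntDisj _ _ 4 (pvAccA_nonneg _ _) (pvTail_bounds _).1
      (dvd_trans (pow_dvd_pow 2 (by omega : 4 ≤ 64 - 5 * 12)) (pvAccA_dvd _ 12 le_rfl))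
      (pvTail_bounds _).2
  · rw [if_neg hlen, if_neg hlen]
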